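-- pv_equiv track=rewrite | github.com/tparida3/60PDonboarding | RTL2GDS_tutorial/design/scripts/dist.py | _parseTclList
-- ===== SOURCE A (Python) =====
-- def _parseTclList(tcl):
--   """Helper to parse a tcl list into a python list"""
--   output = []
--   matchingCharType = None
--   depth = 0
--   startPosition = 0
--   escaped = False
--   for i in range(len(tcl)):
--     character = tcl[i]
--     if matchingCharType == '"':
--       if not escaped:
--         if character == '"':
--           output.append(tcl[startPosition:i])
--           matchingCharType = None
--     elif matchingCharType == '{':
--       if not escaped:
--         if character == '}':
--           if depth == 0:
--             output.append(tcl[startPosition:i])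
--             matchingCharType = None
--           else:
--             depth -= 1
--         elif character == '{':
--           depth += 1
--     elif matchingCharType == ' ':
--       if not escaped:
--         if character == ' ':
--           output.append(tcl[startPosition:i])
--           matchingCharType = None
--     else:
--       if character == ' ':
--         pass
--       elif character == '"' or character == '{':
--         depth = 0
--         matchingCharType = character
--         startPosition = i + 1
--       else:
--         depth = 0
--         matchingCharType = ' '
--         startPosition = i
--     if character == '\\':
--       escaped = not escaped
--     else:
--       escaped = False
--   if matchingCharType == ' ':
--     output.append(tcl[startPosition:])
--     matchingCharType = None
--   return output
-- ===== SOURCE B (Python) =====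
-- def _parseTclList(tcl):
--   """Helper to parse a tcl list into a python list (token-at-a-time scanner)."""
--   output = []
--   n = len(tcl)
--   i = 0
--   while i < n:
--     c = tcl[i]
--     if c == ' ':
--       i += 1
--       continue
--     if c == '"' or c == '{':
--       close, opener = ('"', None) if c == '"' else ('}', '{')
--       start = i + 1
--       j = start
--       depth = 0
--       escaped = False
--       while j < n:
--         if not escaped:
--           if tcl[j] == close:
--             if depth == 0:
--               break
--             depth -= 1
--           elif tcl[j] == opener:
--             depth += 1
--         escaped = (tcl[j] == '\\') and not escaped
--         j += 1
--       else:
--         return output  # unterminated quoted/braced token: dropped, rest discarded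
--       output.append(tcl[start:j])
--       i = j + 1
--     else:
--       start = i
--       j = i
--       escaped = False
--       while j < n and (escaped or tcl[j] != ' '):
--         escaped = (tcl[j] == '\\') and not escaped
--         j += 1
--       output.append(tcl[start:j])
--       i = j + 1
--   return output
-- ===== Notes on version B (the rewrite author's own statement) =====
-- stated objective: alternative
-- what changed: A is a single pass driven by a five-field state machine (matchingCharType/depth/startPosition/escaped updated on every character); B is an outer token loop that skips spaces, dispatches on the first character, and runs a dedicated inner scan per token kind (bare word to unescaped space, quoted/braced to the unescaped balanced closer), with escape state local to each inner scan.
import Mathlib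
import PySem

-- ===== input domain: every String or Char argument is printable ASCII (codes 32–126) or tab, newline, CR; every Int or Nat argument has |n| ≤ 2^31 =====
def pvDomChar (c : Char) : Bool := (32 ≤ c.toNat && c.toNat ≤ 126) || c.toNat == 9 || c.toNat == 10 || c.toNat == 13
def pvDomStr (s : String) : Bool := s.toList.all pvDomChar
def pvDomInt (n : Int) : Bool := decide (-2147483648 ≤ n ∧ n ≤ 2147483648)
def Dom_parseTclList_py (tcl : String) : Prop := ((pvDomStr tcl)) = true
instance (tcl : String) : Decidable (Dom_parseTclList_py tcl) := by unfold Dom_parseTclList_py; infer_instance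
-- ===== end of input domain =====

-- B re-decomposes A's one-pass five-field state machine into an outer token loop with
-- dedicated inner scans per token kind (same cost, 'alternative' decomposition);
-- return values proved equal on all inputs.

-- ===== PORT A =====

-- Python slice tcl[a:b] for nonnegative a, b: drop a, take (b-a) (clamping agrees); exact here.
def sliceCC (s : List Char) (a b : Nat) : String := String.ofList ((s.drop a).take (b - a))

structure AState where
  output : List String
  mct : Option Char      -- matchingCharType: none / '"' / '{' / ' '
  depth : Int
  start : Nat            -- startPosition
  escaped : Bool
deriving DecidableEq, Repr

-- body of A's for-loop at index i (character = tcl[i]; i < len so getD is exact)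
def stepA (s : List Char) (st : AState) (i : Nat) : AState :=
  let c := s.getD i ' '
  let st' :=
    if st.mct = some '"' then
      if !st.escaped && c = '"' then
        { st with output := st.output ++ [sliceCC s st.start i], mct := none }
      else st
    else if st.mct = some '{' then
      if !st.escaped then
        if c = '}' then
          if st.depth = 0 then
            { st with output := st.output ++ [sliceCC s st.start i], mct := none }
          else { st with depth := st.depth - 1 }
        else if c = '{' then { st with depth := st.depth + 1 }
        else st
      else st
    else if st.mct = some ' ' then
      if !st.escaped && c = ' ' then
        { st with output := st.output ++ [sliceCC s st.start i], mct := none }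
      else st
    else
      if c = ' ' then st
      else if c = '"' ∨ c = '{' then { st with depth := 0, mct := some c, start := i + 1 }
      else { st with depth := 0, mct := some ' ', start := i }
  { st' with escaped := c = '\\' && !st.escaped }

-- A's trailing 'if matchingCharType == " ": output.append(tcl[startPosition:])'
def finishA (s : List Char) (st : AState) : List String :=
  if st.mct = some ' ' then st.output ++ [sliceCC s st.start s.length] else st.output

def parseTclList_py (tcl : String) : List String :=
  let s := tcl.toList
  finishA s ((List.range s.length).foldl (stepA s) ⟨[], none, 0, 0, false⟩)

-- ===== PORT B =====

-- inner scan of a quoted (close='"', opener=none) or braced (close='}', opener=some '{')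
-- token: first unescaped close at depth 0, none if it runs off the end.
-- fuel (initially length-j, one unit per loop step) only makes the recursion structural.
def bScanF (s : List Char) (close : Char) (opener : Option Char) :
    Nat → Nat → Int → Bool → Option Nat
  | 0, _, _, _ => none
  | fuel+1, j, depth, esc =>
    if j < s.length then
      if !esc then
        if s.getD j ' ' = close then
          if depth = 0 then some j
          else bScanF s close opener fuel (j+1) (depth - 1) (s.getD j ' ' = '\\' && !esc)
        else if some (s.getD j ' ') = opener then
          bScanF s close opener fuel (j+1) (depth + 1) (s.getD j ' ' = '\\' && !esc)
        else bScanF s close opener fuel (j+1) depth (s.getD j ' ' = '\\' && !esc)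
      else bScanF s close opener fuel (j+1) depth (s.getD j ' ' = '\\' && !esc)
    else none

def bScan (s : List Char) (close : Char) (opener : Option Char) (j : Nat) (depth : Int)
    (esc : Bool) : Option Nat :=
  bScanF s close opener (s.length - j) j depth esc

-- inner scan of a bare word: index of the first unescaped space, or the length
def bScanWordF (s : List Char) : Nat → Nat → Bool → Nat
  | 0, j, _ => j
  | fuel+1, j, esc =>
    if j < s.length ∧ (esc || s.getD j ' ' ≠ ' ') then
      bScanWordF s fuel (j+1) (s.getD j ' ' = '\\' && !esc)
    else j

def bScanWord (s : List Char) (j : Nat) (esc : Bool) : Nat :=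
  bScanWordF s (s.length - j) j esc

-- outer loop: i scans tcl, skipping spaces and dispatching on token kind
def bMainF (s : List Char) : Nat → Nat → List String → List String
  | 0, _, acc => acc
  | fuel+1, i, acc =>
    if i < s.length then
      let c := s.getD i ' '
      if c = ' ' then bMainF s fuel (i+1) acc
      else if c = '"' ∨ c = '{' then
        let close := if c = '"' then '"' else '}'
        let opener : Option Char := if c = '"' then none else some '{'
        match bScan s close opener (i+1) 0 false with
        | some j => bMainF s fuel (j+1) (acc ++ [sliceCC s (i+1) j])
        | none => acc
      else
        let j := bScanWord s i false
        bMainF s fuel (j+1) (acc ++ [sliceCC s i j])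
    else acc

def parseTclList_py_alt (tcl : String) : List String :=
  bMainF tcl.toList tcl.toList.length 0 []

-- ===== PRECONDITION & SPEC =====
def Spec_parseTclList_py (tcl : String) (out : List String) : Prop := out = parseTclList_py_alt tcl
instance (tcl : String) (out : List String) : Decidable (Spec_parseTclList_py tcl out) := by unfold Spec_parseTclList_py; infer_instance

-- ===== CLAIM (what is proved, stated in full; the proofs are below) =====
def Claim_equal_parseTclList_py : Prop := ∀ (tcl : String), Dom_parseTclList_py tcl → Spec_parseTclList_py tcl (parseTclList_py tcl)

-- ===== LEMMAS AND PROOFS =====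

-- stepA specialised to each of A's four states
theorem stepA_quote (s : List Char) (out : List String) (d : Int) (sp i : Nat) (esc : Bool) :
    stepA s ⟨out, some '"', d, sp, esc⟩ i =
      if !esc && (s.getD i ' ' = '"') then
        ⟨out ++ [sliceCC s sp i], none, d, sp, (s.getD i ' ' = '\\' && !esc)⟩
      else ⟨out, some '"', d, sp, (s.getD i ' ' = '\\' && !esc)⟩ := by
  simp only [stepA]
  split_ifs <;> simp_all

theorem stepA_brace (s : List Char) (out : List String) (d : Int) (sp i : Nat) (esc : Bool) :
    stepA s ⟨out, some '{', d, sp, esc⟩ i =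
      if !esc then
        if s.getD i ' ' = '}' then
          if d = 0 then ⟨out ++ [sliceCC s sp i], none, d, sp, (s.getD i ' ' = '\\' && !esc)⟩
          else ⟨out, some '{', d - 1, sp, (s.getD i ' ' = '\\' && !esc)⟩
        else if s.getD i ' ' = '{' then ⟨out, some '{', d + 1, sp, (s.getD i ' ' = '\\' && !esc)⟩
        else ⟨out, some '{', d, sp, (s.getD i ' ' = '\\' && !esc)⟩
      else ⟨out, some '{', d, sp, (s.getD i ' ' = '\\' && !esc)⟩ := by
  simp only [stepA]
  split_ifs <;> simp_all

theorem stepA_word (s : List Char) (out : List String) (d : Int) (sp i : Nat) (esc : Bool) :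
    stepA s ⟨out, some ' ', d, sp, esc⟩ i =
      if !esc && (s.getD i ' ' = ' ') then
        ⟨out ++ [sliceCC s sp i], none, d, sp, (s.getD i ' ' = '\\' && !esc)⟩
      else ⟨out, some ' ', d, sp, (s.getD i ' ' = '\\' && !esc)⟩ := by
  simp only [stepA]
  split_ifs <;> simp_all

theorem stepA_none (s : List Char) (out : List String) (d : Int) (sp i : Nat) :
    stepA s ⟨out, none, d, sp, false⟩ i =
      if s.getD i ' ' = ' ' then ⟨out, none, d, sp, false⟩
      else if s.getD i ' ' = '"' ∨ s.getD i ' ' = '{' then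
        ⟨out, some (s.getD i ' '), 0, i + 1, (s.getD i ' ' = '\\' : Bool)⟩
      else ⟨out, some ' ', 0, i, (s.getD i ' ' = '\\' : Bool)⟩ := by
  simp only [stepA]
  split_ifs <;> simp_all

-- one-step equation lemmas for B's scans (exact fuel: length - j)
theorem bScan_end (s : List Char) (cl : Char) (op : Option Char) (j : Nat) (d : Int) (e : Bool)
    (h : ¬ j < s.length) : bScan s cl op j d e = none := by
  unfold bScan
  rw [show s.length - j = 0 from by omega]
  rfl

theorem bScan_step (s : List Char) (cl : Char) (op : Option Char) (j : Nat) (d : Int) (e : Bool)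
    (h : j < s.length) :
    bScan s cl op j d e =
      if !e then
        if s.getD j ' ' = cl then
          if d = 0 then some j
          else bScan s cl op (j+1) (d - 1) (s.getD j ' ' = '\\' && !e)
        else if some (s.getD j ' ') = op then bScan s cl op (j+1) (d + 1) (s.getD j ' ' = '\\' && !e)
        else bScan s cl op (j+1) d (s.getD j ' ' = '\\' && !e)
      else bScan s cl op (j+1) d (s.getD j ' ' = '\\' && !e) := by
  unfold bScan
  rw [show s.length - j = (s.length - (j+1)) + 1 from by omega]
  rw [bScanF, if_pos h]

theorem bScanWord_end (s : List Char) (j : Nat) (e : Bool)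
    (h : ¬ (j < s.length ∧ (e || s.getD j ' ' ≠ ' '))) : bScanWord s j e = j := by
  unfold bScanWord
  rcases Nat.eq_zero_or_eq_succ_pred (s.length - j) with h0 | h0 <;> rw [h0]
  · rfl
  · rw [bScanWordF, if_neg h]

theorem bScanWord_step (s : List Char) (j : Nat) (e : Bool)
    (h : j < s.length ∧ (e || s.getD j ' ' ≠ ' ')) :
    bScanWord s j e = bScanWord s (j+1) (s.getD j ' ' = '\\' && !e) := by
  unfold bScanWord
  rw [show s.length - j = (s.length - (j+1)) + 1 from by omega]
  rw [bScanWordF, if_pos h]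

theorem bScanWordF_ge (s : List Char) :
    ∀ (fuel j : Nat) (esc : Bool), j ≤ bScanWordF s fuel j esc := by
  intro fuel
  induction fuel with
  | zero => intro j esc; exact Nat.le_refl j
  | succ fuel ih =>
    intro j esc
    rw [bScanWordF]
    split_ifs with h
    · exact Nat.le_trans (by omega) (ih (j+1) _)
    · exact Nat.le_refl j

theorem bScanWord_ge (s : List Char) (j : Nat) (esc : Bool) : j ≤ bScanWord s j esc :=
  bScanWordF_ge s _ j esc

theorem bScanWordF_le (s : List Char) :
    ∀ (fuel j : Nat) (esc : Bool), j ≤ s.length → bScanWordF s fuel j esc ≤ s.length := by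
  intro fuel
  induction fuel with
  | zero => intro j esc hj; exact hj
  | succ fuel ih =>
    intro j esc hj
    rw [bScanWordF]
    split_ifs with h
    · exact ih (j+1) _ (by omega)
    · exact hj

theorem bScanWord_le (s : List Char) (j : Nat) (esc : Bool) (hj : j ≤ s.length) :
    bScanWord s j esc ≤ s.length :=
  bScanWordF_le s _ j esc hj

theorem bScanF_some_ge (s : List Char) (cl : Char) (op : Option Char) :
    ∀ (fuel j : Nat) (d : Int) (e : Bool) (k : Nat), bScanF s cl op fuel j d e = some k →
    j ≤ k ∧ k < s.length := by
  intro fuel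
  induction fuel with
  | zero => intro j d e k hk; exact absurd hk (by simp [bScanF])
  | succ fuel ih =>
    intro j d e k hk
    rw [bScanF] at hk
    split_ifs at hk
    all_goals
      first
        | (simp only [Option.some.injEq] at hk; omega)
        | (have := ih (j+1) _ _ k hk; omega)

theorem bScan_some_ge (s : List Char) (cl : Char) (op : Option Char) (j : Nat) (d : Int)
    (e : Bool) (k : Nat) (hk : bScan s cl op j d e = some k) : j ≤ k ∧ k < s.length :=
  bScanF_some_ge s cl op _ j d e k hk

-- one-step equation lemmas for B's outer loop
theorem bMainF_zero (s : List Char) (i : Nat) (acc : List String) : bMainF s 0 i acc = acc := rfl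

theorem bMainF_succ (s : List Char) (fuel i : Nat) (acc : List String) :
    bMainF s (fuel+1) i acc =
      if i < s.length then
        if s.getD i ' ' = ' ' then bMainF s fuel (i+1) acc
        else if s.getD i ' ' = '"' ∨ s.getD i ' ' = '{' then
          match bScan s (if s.getD i ' ' = '"' then '"' else '}')
              (if s.getD i ' ' = '"' then none else some '{') (i+1) 0 false with
          | some j => bMainF s fuel (j+1) (acc ++ [sliceCC s (i+1) j])
          | none => acc
        else bMainF s fuel (bScanWord s i false + 1) (acc ++ [sliceCC s i (bScanWord s i false)])
      else acc := by
  rw [bMainF]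

-- fast-forward through A's bare-word state: A agrees with bScanWord
theorem wordFF (s : List Char) :
    ∀ (m i : Nat), i + m = s.length → ∀ (out : List String) (d : Int) (sp : Nat) (esc : Bool),
    finishA s ((List.range' i m).foldl (stepA s) ⟨out, some ' ', d, sp, esc⟩) =
      (if bScanWord s i esc < s.length
       then finishA s ((List.range' (bScanWord s i esc + 1) (s.length - (bScanWord s i esc + 1))).foldl
              (stepA s) ⟨out ++ [sliceCC s sp (bScanWord s i esc)], none, d, sp, false⟩)
       else out ++ [sliceCC s sp s.length]) := by
  intro m
  induction m with
  | zero =>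
    intro i hi out d sp esc
    rw [bScanWord_end s i esc (by omega), if_neg (by omega)]
    simp [finishA]
  | succ m ih =>
    intro i hi out d sp esc
    have hn : i < s.length := by omega
    rw [List.range'_succ, List.foldl_cons, stepA_word]
    cases esc with
    | true =>
      rw [if_neg (by simp)]
      rw [bScanWord_step s i true ⟨hn, by simp⟩]
      exact ih (i+1) (by omega) out d sp _
    | false =>
      by_cases hc : s.getD i ' ' = ' '
      · rw [if_pos (by rw [hc]; decide)]
        rw [bScanWord_end s i false (by rw [hc]; simp), if_pos hn]
        rw [show (decide (s.getD i ' ' = '\\') && !false) = false by rw [hc]; decide]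
        rw [show m = s.length - (i + 1) from by omega]
      · rw [if_neg (by simp only [Bool.not_false, Bool.true_and, decide_eq_true_eq]; exact hc)]
        rw [bScanWord_step s i false ⟨hn, by simp only [Bool.false_or, decide_eq_true_eq]; exact hc⟩]
        exact ih (i+1) (by omega) out d sp _

-- fast-forward through A's quote state: A agrees with bScan '"' none at depth 0
theorem quoteFF (s : List Char) :
    ∀ (m i : Nat), i + m = s.length → ∀ (out : List String) (d : Int) (sp : Nat) (esc : Bool),
    finishA s ((List.range' i m).foldl (stepA s) ⟨out, some '"', d, sp, esc⟩) =
      (match bScan s '"' none i 0 esc with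
       | some j => finishA s ((List.range' (j + 1) (s.length - (j + 1))).foldl (stepA s)
                     ⟨out ++ [sliceCC s sp j], none, d, sp, false⟩)
       | none => out) := by
  intro m
  induction m with
  | zero =>
    intro i hi out d sp esc
    rw [bScan_end s '"' none i 0 esc (by omega)]
    simp [finishA]
  | succ m ih =>
    intro i hi out d sp esc
    have hn : i < s.length := by omega
    rw [List.range'_succ, List.foldl_cons, stepA_quote, bScan_step s '"' none i 0 esc hn]
    cases esc with
    | true =>
      rw [if_neg (by simp), if_neg (by simp)]
      exact ih (i+1) (by omega) out d sp _
    | false =>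
      by_cases hc : s.getD i ' ' = '"'
      · rw [if_pos (show (!false && decide (s.getD i ' ' = '"')) = true by rw [hc]; decide)]
        rw [if_pos (show (!false) = true by decide), if_pos hc, if_pos (show (0:Int) = 0 from rfl)]
        rw [show (decide (s.getD i ' ' = '\\') && !false) = false by rw [hc]; decide]
        rw [show m = s.length - (i + 1) from by omega]
      · rw [if_neg (by simp only [Bool.not_false, Bool.true_and, decide_eq_true_eq]; exact hc)]
        rw [if_pos (show (!false) = true by decide), if_neg hc]
        rw [if_neg (show ¬(some (s.getD i ' ') = none) by simp)]
        exact ih (i+1) (by omega) out d sp _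

-- fast-forward through A's brace state: A agrees with bScan '}' (some '{')
theorem braceFF (s : List Char) :
    ∀ (m i : Nat), i + m = s.length → ∀ (out : List String) (d : Int) (sp : Nat) (esc : Bool),
    finishA s ((List.range' i m).foldl (stepA s) ⟨out, some '{', d, sp, esc⟩) =
      (match bScan s '}' (some '{') i d esc with
       | some j => finishA s ((List.range' (j + 1) (s.length - (j + 1))).foldl (stepA s)
                     ⟨out ++ [sliceCC s sp j], none, 0, sp, false⟩)
       | none => out) := by
  intro m
  induction m with
  | zero =>
    intro i hi out d sp esc
    rw [bScan_end s '}' (some '{') i d esc (by omega)]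
    simp [finishA]
  | succ m ih =>
    intro i hi out d sp esc
    have hn : i < s.length := by omega
    rw [List.range'_succ, List.foldl_cons, stepA_brace, bScan_step s '}' (some '{') i d esc hn]
    cases esc with
    | true =>
      rw [if_neg (by simp), if_neg (by simp)]
      exact ih (i+1) (by omega) out d sp _
    | false =>
      rw [if_pos (show (!false) = true by decide)]
      rw [if_pos (show (!false) = true by decide)]
      by_cases hc : s.getD i ' ' = '}'
      · rw [if_pos hc, if_pos hc]
        by_cases hd : d = 0
        · subst hd
          rw [if_pos (show (0:Int) = 0 from rfl)]
          rw [if_pos (show (0:Int) = 0 from rfl)]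
          rw [show (decide (s.getD i ' ' = '\\') && !false) = false by rw [hc]; decide]
          rw [show m = s.length - (i + 1) from by omega]
        · rw [if_neg hd, if_neg hd]
          exact ih (i+1) (by omega) out (d-1) sp _
      · rw [if_neg hc, if_neg hc]
        by_cases ho : s.getD i ' ' = '{'
        · rw [if_pos ho, if_pos (by rw [ho])]
          exact ih (i+1) (by omega) out (d+1) sp _
        · rw [if_neg ho, if_neg (by simp only [Option.some.injEq]; exact ho)]
          exact ih (i+1) (by omega) out d sp _

-- main correspondence: from A's default state, the rest of A's pass computes bMainF
theorem mainLemma (s : List Char) :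
    ∀ (fuel i : Nat), s.length - i ≤ fuel → ∀ (out : List String) (d : Int) (sp : Nat),
    finishA s ((List.range' i (s.length - i)).foldl (stepA s) ⟨out, none, d, sp, false⟩) =
      bMainF s fuel i out := by
  intro fuel
  induction fuel with
  | zero =>
    intro i hf out d sp
    rw [show s.length - i = 0 from by omega, bMainF_zero]
    simp [finishA]
  | succ fuel ih =>
    intro i hf out d sp
    rw [bMainF_succ]
    by_cases hn : i < s.length
    · rw [if_pos hn]
      rw [show s.length - i = (s.length - (i+1)) + 1 from by omega]
      rw [List.range'_succ, List.foldl_cons, stepA_none]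
      by_cases hsp : s.getD i ' ' = ' '
      · rw [if_pos hsp, if_pos hsp]
        exact ih (i+1) (by omega) out d sp
      · rw [if_neg hsp, if_neg hsp]
        by_cases hq : s.getD i ' ' = '"' ∨ s.getD i ' ' = '{'
        · rw [if_pos hq, if_pos hq]
          rcases hq with hq | hq <;> rw [hq]
          · -- quoted token
            rw [if_pos rfl]
            rw [show (decide (('"' : Char) = '\\')) = false by decide]
            rw [if_pos (show ('"' : Char) = '"' from rfl)]
            rw [quoteFF s (s.length - (i+1)) (i+1) (by omega) out 0 (i+1) false]
            cases hs : bScan s '"' none (i+1) 0 false with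
            | some j =>
              have hj := bScan_some_ge s '"' none (i+1) 0 false j hs
              simp only [ih (j+1) (by omega) (out ++ [sliceCC s (i+1) j]) 0 (i+1)]
            | none => rfl
          · -- braced token
            rw [if_neg (by decide)]
            rw [show (decide (('{' : Char) = '\\')) = false by decide]
            rw [if_neg (show ¬(('{' : Char) = '"') by decide)]
            rw [braceFF s (s.length - (i+1)) (i+1) (by omega) out 0 (i+1) false]
            cases hs : bScan s '}' (some '{') (i+1) 0 false with
            | some j =>
              have hj := bScan_some_ge s '}' (some '{') (i+1) 0 false j hs
              simp only [ih (j+1) (by omega) (out ++ [sliceCC s (i+1) j]) 0 (i+1)]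
            | none => rfl
        · -- bare word
          rw [if_neg hq, if_neg hq]
          rw [bScanWord_step s i false ⟨hn, by simp only [Bool.false_or, decide_eq_true_eq]; exact hsp⟩]
          simp only [Bool.not_false, Bool.and_true]
          rw [wordFF s (s.length - (i+1)) (i+1) (by omega) out 0 i (decide (s.getD i ' ' = '\\'))]
          by_cases hj : bScanWord s (i+1) (decide (s.getD i ' ' = '\\')) < s.length
          · rw [if_pos hj]
            have hge := bScanWord_ge s (i+1) (decide (s.getD i ' ' = '\\'))
            rw [ih _ (by omega) (out ++ [sliceCC s i (bScanWord s (i+1) (decide (s.getD i ' ' = '\\')))]) 0 i]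
          · rw [if_neg hj]
            have hle := bScanWord_le s (i+1) (decide (s.getD i ' ' = '\\')) (by omega)
            rw [show bScanWord s (i+1) (decide (s.getD i ' ' = '\\')) = s.length from by omega]
            rcases Nat.eq_zero_or_eq_succ_pred fuel with h0 | h0 <;> rw [h0]
            · rfl
            · rw [bMainF, if_neg (by omega)]
    · rw [if_neg hn]
      rw [show s.length - i = 0 from by omega]
      simp [finishA]

-- ===== VERDICT (by name: the statement is the Claim_ definition above) =====
theorem parseTclList_py_spec : Claim_equal_parseTclList_py := by
  intro tcl _
  unfold Spec_parseTclList_py parseTclList_py parseTclList_py_alt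
  simp only [List.range_eq_range']
  have := mainLemma tcl.toList tcl.toList.length 0 (by omega) [] 0 0
  simpa using this
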